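-- pv_equiv track=rewrite | github.com/pypi-data/pypi-mirror-320 | packages/pytigon-lib/pytigon_lib-0.250110-py3-none-any.whl/pytigon_lib/schtable/vfstable.py | _size_to_color
-- ===== SOURCE A (Python) =====
-- def _size_to_color(size):
--     colors = (
--         (1024, "#fff"),
--         (1048576, "#fdd"),
--         (1073741824, "#f99,#FFF"),
--         (1099511627776, "#000,#FFF"),
--     )
--     for pos in colors:
--         if size < pos[0]:
--             return pos[1]
--     return colors[-1][1]
-- ===== SOURCE B (Python) =====
-- import bisect
--
-- _THRESHOLDS = [1024, 1048576, 1073741824, 1099511627776]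
-- _COLORS = ["#fff", "#fdd", "#f99,#FFF", "#000,#FFF"]
--
-- def _size_to_color(size):
--     idx = bisect.bisect_right(_THRESHOLDS, size)
--     return _COLORS[min(idx, len(_COLORS) - 1)]
-- ===== Notes on version B (the rewrite author's own statement) =====
-- stated objective: idiomatic
-- what changed: Replaces the linear scan over (threshold, color) pairs by a bisect_right binary search over a prebuilt threshold list, indexing a parallel color list with a clamped index.
import Mathlib
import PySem

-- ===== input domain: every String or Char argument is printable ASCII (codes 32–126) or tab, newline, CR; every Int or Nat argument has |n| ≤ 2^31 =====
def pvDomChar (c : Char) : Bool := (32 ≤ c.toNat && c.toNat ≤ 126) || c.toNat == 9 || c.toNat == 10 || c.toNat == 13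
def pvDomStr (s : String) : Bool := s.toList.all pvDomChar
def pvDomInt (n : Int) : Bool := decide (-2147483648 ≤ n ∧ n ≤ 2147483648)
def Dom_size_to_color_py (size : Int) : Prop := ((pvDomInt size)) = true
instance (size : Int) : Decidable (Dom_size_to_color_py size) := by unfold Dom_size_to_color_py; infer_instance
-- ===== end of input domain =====

-- B replaces A's linear scan of (threshold, color) pairs by bisect_right over a threshold list
-- indexing a parallel color list (idiomatic; return value only, no side effects involved).

-- ===== PORT A =====
-- the for-loop over the literal tuple of pairs, with early return on the first threshold exceeding size
def pvLoopA (size : Int) : List (Int × String) → Option String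
  | [] => none
  | pos :: rest => if size < pos.1 then some pos.2 else pvLoopA size rest

def size_to_color_py (size : Int) : String :=
  let colors : List (Int × String) :=
    [(1024, "#fff"), (1048576, "#fdd"), (1073741824, "#f99,#FFF"), (1099511627776, "#000,#FFF")]
  match pvLoopA size colors with
  | some c => c
  | none => ((1099511627776 : Int), "#000,#FFF").2  -- colors[-1][1]

-- ===== PORT B =====
-- bisect.bisect_right: the standard lo/hi binary search, exact transcription of CPython's bisect_right
def pvBisectGo (xs : List Int) (x : Int) (lo hi : Nat) : Nat :=
  if _h : lo < hi then
    let mid := (lo + hi) / 2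
    if x < xs.getD mid 0 then pvBisectGo xs x lo mid else pvBisectGo xs x (mid + 1) hi
  else lo
termination_by hi - lo
decreasing_by all_goals omega

def pvBisectRight (xs : List Int) (x : Int) : Nat := pvBisectGo xs x 0 xs.length

def size_to_color_py_alt (size : Int) : String :=
  let thresholds : List Int := [1024, 1048576, 1073741824, 1099511627776]
  let colors : List String := ["#fff", "#fdd", "#f99,#FFF", "#000,#FFF"]
  let idx := pvBisectRight thresholds size
  colors.getD (min idx (colors.length - 1)) ""

-- ===== PRECONDITION & SPEC =====
def Spec_size_to_color_py (size : Int) (out : String) : Prop := out = size_to_color_py_alt size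
instance (size : Int) (out : String) : Decidable (Spec_size_to_color_py size out) := by unfold Spec_size_to_color_py; infer_instance

-- ===== CLAIM (what is proved, stated in full; the proofs are below) =====
def Claim_equal_size_to_color_py : Prop := ∀ (size : Int), Dom_size_to_color_py size → Spec_size_to_color_py size (size_to_color_py size)

-- ===== LEMMAS AND PROOFS =====

def pvT : List Int := [1024, 1048576, 1073741824, 1099511627776]

theorem bis0 (size : Int) (h : size < 1024) : pvBisectRight pvT size = 0 := by
  unfold pvBisectRight
  rw [pvBisectGo.eq_def]; norm_num [pvT]
  repeat (first | rw [if_pos (by omega)] | rw [if_neg (by omega)] | rw [pvBisectGo.eq_def] | norm_num [pvT])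

theorem bis1 (size : Int) (h1 : 1024 ≤ size) (h2 : size < 1048576) : pvBisectRight pvT size = 1 := by
  unfold pvBisectRight
  rw [pvBisectGo.eq_def]; norm_num [pvT]
  repeat (first | rw [if_pos (by omega)] | rw [if_neg (by omega)] | rw [pvBisectGo.eq_def] | norm_num [pvT])

theorem bis2 (size : Int) (h1 : 1048576 ≤ size) (h2 : size < 1073741824) : pvBisectRight pvT size = 2 := by
  unfold pvBisectRight
  rw [pvBisectGo.eq_def]; norm_num [pvT]
  repeat (first | rw [if_pos (by omega)] | rw [if_neg (by omega)] | rw [pvBisectGo.eq_def] | norm_num [pvT])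

theorem bis3 (size : Int) (h1 : 1073741824 ≤ size) (h2 : size < 1099511627776) : pvBisectRight pvT size = 3 := by
  unfold pvBisectRight
  rw [pvBisectGo.eq_def]; norm_num [pvT]
  repeat (first | rw [if_pos (by omega)] | rw [if_neg (by omega)] | rw [pvBisectGo.eq_def] | norm_num [pvT])

theorem bis4 (size : Int) (h1 : 1099511627776 ≤ size) : pvBisectRight pvT size = 4 := by
  unfold pvBisectRight
  rw [pvBisectGo.eq_def]; norm_num [pvT]
  repeat (first | rw [if_pos (by omega)] | rw [if_neg (by omega)] | rw [pvBisectGo.eq_def] | norm_num [pvT])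

theorem alt_closed (size : Int) :
    size_to_color_py_alt size =
      if size < 1024 then "#fff"
      else if size < 1048576 then "#fdd"
      else if size < 1073741824 then "#f99,#FFF"
      else if size < 1099511627776 then "#000,#FFF"
      else "#000,#FFF" := by
  show ["#fff", "#fdd", "#f99,#FFF", "#000,#FFF"].getD (min (pvBisectRight pvT size) 3) "" = _
  by_cases h0 : size < 1024
  · rw [bis0 size h0]; simp [h0]
  · by_cases h1 : size < 1048576
    · rw [bis1 size (by omega) h1]; simp [h0, h1]
    · by_cases h2 : size < 1073741824
      · rw [bis2 size (by omega) h2]; simp [h0, h1, h2]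
      · by_cases h3 : size < 1099511627776
        · rw [bis3 size (by omega) h3]; simp [h0, h1, h2, h3]
        · rw [bis4 size (by omega)]; simp [h0, h1, h2, h3]

-- ===== VERDICT (by name: the statement is the Claim_ definition above) =====
theorem size_to_color_py_spec : Claim_equal_size_to_color_py := by
  intro size _
  unfold Spec_size_to_color_py size_to_color_py
  rw [alt_closed]
  simp only [pvLoopA]
  split_ifs <;> simp_all
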